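-- pv_equiv track=rewrite | github.com/cleverjobs/blazor-rag | scripts/normalize_forum.py | consolidate_code_blocks
-- ===== SOURCE A (Python) =====
-- def consolidate_code_blocks(markdown_content: str) -> str:
--     """Post-process markdown to consolidate adjacent code blocks of the same language."""
--     import re
--
--     # Pattern to match code blocks
--     code_block_pattern = re.compile(r'^```(\w+)\n(.*?)\n```\s*$', re.MULTILINE | re.DOTALL)
--
--     lines = markdown_content.split('\n')
--     result_lines = []
--     i = 0
--
--     while i < len(lines):
--         line = lines[i]
--
--         # Check if this line starts a code block
--         if line.startswith('```') and not line.endswith('```'):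
--             language = line[3:].strip()
--             code_lines = []
--             i += 1
--
--             # Collect code lines until we hit the closing ```
--             while i < len(lines) and not lines[i].startswith('```'):
--                 code_lines.append(lines[i])
--                 i += 1
--
--             # Skip the closing ```
--             if i < len(lines):
--                 i += 1
--
--             # Look ahead for adjacent code blocks of the same language
--             while i < len(lines):
--                 # Skip empty lines
--                 while i < len(lines) and lines[i].strip() == '':
--                     i += 1
--
--                 # Check if next non-empty line starts another code block of same language
--                 if (i < len(lines) and
--                     lines[i].startswith('```') and
--                     lines[i][3:].strip() == language):
--
--                     i += 1  # Skip opening ```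
--
--                     # Collect more code lines
--                     while i < len(lines) and not lines[i].startswith('```'):
--                         code_lines.append(lines[i])
--                         i += 1
--
--                     # Skip closing ```
--                     if i < len(lines):
--                         i += 1
--                 else:
--                     break
--
--             # Add the consolidated code block
--             result_lines.append(f'```{language}')
--             result_lines.extend(code_lines)
--             result_lines.append('```')
--
--         else:
--             result_lines.append(line)
--             i += 1
--
--     return '\n'.join(result_lines)
-- ===== SOURCE B (Python) =====
-- def consolidate_code_blocks(markdown_content: str) -> str:
--     """Single-pass three-state machine: OUT / IN(collecting code) / AFTER(block closed,
--     absorbing blanks and same-language continuations); flush pending block at EOF."""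
--     out = []
--     mode = 'out'
--     lang = ''
--     code = []
--
--     def flush():
--         out.append('```' + lang)
--         out.extend(code)
--         out.append('```')
--
--     for line in markdown_content.split('\n'):
--         if mode == 'in':
--             if line.startswith('```'):
--                 mode = 'after'
--             else:
--                 code.append(line)
--         elif mode == 'after':
--             if line.strip() == '':
--                 pass  # blank lines after a block are dropped
--             elif line.startswith('```') and line[3:].strip() == lang:
--                 mode = 'in'  # same-language continuation: keep collecting
--             else:
--                 flush()
--                 mode = 'out'
--                 if line.startswith('```') and not line.endswith('```'):
--                     mode, lang, code = 'in', line[3:].strip(), []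
--                 else:
--                     out.append(line)
--         else:  # mode == 'out'
--             if line.startswith('```') and not line.endswith('```'):
--                 mode, lang, code = 'in', line[3:].strip(), []
--             else:
--                 out.append(line)
--     if mode != 'out':
--         flush()
--     return '\n'.join(out)
-- ===== Notes on version B (the rewrite author's own statement) =====
-- stated objective: simpler
-- what changed: A's four nested index-juggling while-loops (outer scan, code collection, blank skipping, same-language look-ahead) are replaced by a single left fold over the lines with an explicit three-state machine (outside / inside a block / just after a block) plus one final flush at EOF.
import Mathlib
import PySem

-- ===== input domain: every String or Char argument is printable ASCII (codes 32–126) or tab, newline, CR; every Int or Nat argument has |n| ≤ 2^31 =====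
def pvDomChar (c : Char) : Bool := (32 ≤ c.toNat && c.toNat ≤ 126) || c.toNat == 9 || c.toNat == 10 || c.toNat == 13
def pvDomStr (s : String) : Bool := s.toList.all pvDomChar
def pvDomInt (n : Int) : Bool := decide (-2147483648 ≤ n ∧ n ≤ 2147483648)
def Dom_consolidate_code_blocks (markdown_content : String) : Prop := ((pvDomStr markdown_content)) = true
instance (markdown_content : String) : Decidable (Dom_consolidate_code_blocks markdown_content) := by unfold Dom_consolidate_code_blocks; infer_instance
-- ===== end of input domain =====

-- B replaces A's four nested index-juggling while-loops by a single left fold with an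
-- explicit three-state machine (objective: simpler); return values proved equal on all inputs.

-- ===== PORT A =====
-- A's while-loops advance a line index i; each is ported as recursion on a fuel argument
-- (initialised to lines.length, enough for every run: i grows by ≥ 1 per iteration) so the
-- loop body is a step-for-step transcription of A's code.

-- A's inner 'collect code lines until a ``` line (or EOF)' loop; returns (new i, code)
def pvA_collect (lines : List String) : Nat → Nat → List String → Nat × List String
  | 0, i, code => (i, code)
  | fuel + 1, i, code =>
    if i < lines.length then
      if PySem.Str.startswith (lines.getD i "") "```" then (i, code)
      else pvA_collect lines fuel (i + 1) (code ++ [lines.getD i ""])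
    else (i, code)

-- A's 'skip empty lines' loop inside the look-ahead
def pvA_skipBlanks (lines : List String) : Nat → Nat → Nat
  | 0, i => i
  | fuel + 1, i =>
    if i < lines.length then
      if PySem.Str.strip (lines.getD i "") == "" then pvA_skipBlanks lines fuel (i + 1) else i
    else i

-- A's look-ahead loop: skip blank lines, absorb further same-language fenced blocks
def pvA_look (lines : List String) : Nat → Nat → String → List String → Nat × List String
  | 0, i, _, code => (i, code)
  | fuel + 1, i, language, code =>
    let j := pvA_skipBlanks lines lines.length i
    if j < lines.length then
      if PySem.Str.startswith (lines.getD j "") "```" &&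
          (PySem.Str.strip (PySem.Str.slice (lines.getD j "") (some 3) none) == language) then
        let r := pvA_collect lines lines.length (j + 1) code
        let k := if r.1 < lines.length then r.1 + 1 else r.1
        pvA_look lines fuel k language r.2
      else (j, code)
    else (j, code)

-- A's outer while-loop over the line index
def pvA_main (lines : List String) : Nat → Nat → List String → List String
  | 0, _, acc => acc
  | fuel + 1, i, acc =>
    if i < lines.length then
      let line := lines.getD i ""
      if PySem.Str.startswith line "```" && !(PySem.Str.endswith line "```") then
        let language := PySem.Str.strip (PySem.Str.slice line (some 3) none)
        let r := pvA_collect lines lines.length (i + 1) []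
        let i2 := if r.1 < lines.length then r.1 + 1 else r.1
        let s := pvA_look lines lines.length i2 language r.2
        pvA_main lines fuel s.1 (acc ++ [("```" ++ language)] ++ s.2 ++ ["```"])
      else
        pvA_main lines fuel (i + 1) (acc ++ [line])
    else acc

def consolidate_code_blocks (markdown_content : String) : String :=
  PySem.Str.join "\n"
    (pvA_main ((PySem.Str.split? markdown_content "\n").getD [])
      ((PySem.Str.split? markdown_content "\n").getD []).length 0 [])

-- ===== PORT B =====
inductive PvBMode | out | ins | after
deriving DecidableEq, Repr

-- Source B's flush(): emit the pending consolidated block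
def pvB_flush (outAcc : List String) (lang : String) (code : List String) : List String :=
  outAcc ++ [("```" ++ lang)] ++ code ++ ["```"]

-- Source B's loop body: one line updates the machine state (out, mode, lang, code)
def pvB_step (st : List String × PvBMode × String × List String) (line : String) :
    List String × PvBMode × String × List String :=
  match st with
  | (outAcc, mode, lang, code) =>
    match mode with
    | .ins =>
        if PySem.Str.startswith line "```" then (outAcc, .after, lang, code)
        else (outAcc, .ins, lang, code ++ [line])
    | .after =>
        if PySem.Str.strip line == "" then (outAcc, .after, lang, code)
        else if PySem.Str.startswith line "```" &&
            (PySem.Str.strip (PySem.Str.slice line (some 3) none) == lang) then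
          (outAcc, .ins, lang, code)
        else
          let out2 := pvB_flush outAcc lang code
          if PySem.Str.startswith line "```" && !(PySem.Str.endswith line "```") then
            (out2, .ins, PySem.Str.strip (PySem.Str.slice line (some 3) none), [])
          else (out2 ++ [line], .out, lang, code)
    | .out =>
        if PySem.Str.startswith line "```" && !(PySem.Str.endswith line "```") then
          (outAcc, .ins, PySem.Str.strip (PySem.Str.slice line (some 3) none), [])
        else (outAcc ++ [line], .out, lang, code)

def consolidate_code_blocks_alt (markdown_content : String) : String :=
  match ((PySem.Str.split? markdown_content "\n").getD []).foldl pvB_step ([], .out, "", []) with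
  | (outAcc, mode, lang, code) =>
      PySem.Str.join "\n" (if mode = PvBMode.out then outAcc else pvB_flush outAcc lang code)

-- ===== PRECONDITION & SPEC =====
def Spec_consolidate_code_blocks (markdown_content : String) (out : String) : Prop := out = consolidate_code_blocks_alt markdown_content
instance (markdown_content : String) (out : String) : Decidable (Spec_consolidate_code_blocks markdown_content out) := by unfold Spec_consolidate_code_blocks; infer_instance

-- ===== CLAIM (what is proved, stated in full; the proofs are below) =====
def Claim_equal_consolidate_code_blocks : Prop := ∀ (markdown_content : String), Dom_consolidate_code_blocks markdown_content → Spec_consolidate_code_blocks markdown_content (consolidate_code_blocks markdown_content)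

-- ===== LEMMAS AND PROOFS =====
-- values past the end of the list
theorem pvA_collect_stop (lines : List String) (f i : Nat) (code : List String)
    (h : ¬ i < lines.length) : pvA_collect lines f i code = (i, code) := by
  cases f <;> simp [pvA_collect, h]

theorem pvA_skipBlanks_stop' (lines : List String) (f i : Nat)
    (h : ¬ i < lines.length) : pvA_skipBlanks lines f i = i := by
  cases f <;> simp [pvA_skipBlanks, h]

theorem pvA_look_stop (lines : List String) (f i : Nat) (language : String) (code : List String)
    (h : ¬ i < lines.length) : pvA_look lines f i language code = (i, code) := by
  cases f with
  | zero => simp [pvA_look]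
  | succ f => simp [pvA_look, pvA_skipBlanks_stop' lines lines.length i h, h]

theorem pvA_main_stop (lines : List String) (f i : Nat) (acc : List String)
    (h : ¬ i < lines.length) : pvA_main lines f i acc = acc := by
  cases f <;> simp [pvA_main, h]

-- the loops never move the index backwards
theorem pvA_collect_ge (lines : List String) (f : Nat) : ∀ (i : Nat) (code : List String),
    i ≤ (pvA_collect lines f i code).1 := by
  induction f with
  | zero => intro i code; simp [pvA_collect]
  | succ f ih =>
      intro i code
      simp only [pvA_collect]
      split
      · split
        · simp
        · exact le_trans (Nat.le_succ i) (ih (i + 1) _)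
      · simp

theorem pvA_skipBlanks_ge (lines : List String) (f : Nat) : ∀ (i : Nat),
    i ≤ pvA_skipBlanks lines f i := by
  induction f with
  | zero => intro i; simp [pvA_skipBlanks]
  | succ f ih =>
      intro i
      simp only [pvA_skipBlanks]
      split
      · split
        · exact le_trans (Nat.le_succ i) (ih (i + 1))
        · exact le_refl i
      · exact le_refl i

theorem pvA_look_ge (lines : List String) (f : Nat) : ∀ (i : Nat) (language : String)
    (code : List String), i ≤ (pvA_look lines f i language code).1 := by
  induction f with
  | zero => intro i language code; simp [pvA_look]
  | succ f ih =>
      intro i language code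
      simp only [pvA_look]
      have h1 := pvA_skipBlanks_ge lines lines.length i
      split
      · split
        · have h2 := pvA_collect_ge lines lines.length (pvA_skipBlanks lines lines.length i + 1) code
          have h3 := ih (if (pvA_collect lines lines.length (pvA_skipBlanks lines lines.length i + 1) code).1 < lines.length
              then (pvA_collect lines lines.length (pvA_skipBlanks lines lines.length i + 1) code).1 + 1
              else (pvA_collect lines lines.length (pvA_skipBlanks lines lines.length i + 1) code).1)
            language (pvA_collect lines lines.length (pvA_skipBlanks lines lines.length i + 1) code).2
          split at h3 <;> split <;> omega
        · simpa using h1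
      · simpa using h1

-- enough fuel: the computed value does not depend on the exact fuel
theorem pvA_collect_irrel (lines : List String) (f : Nat) : ∀ (g i : Nat) (code : List String),
    lines.length - i ≤ f → lines.length - i ≤ g →
    pvA_collect lines f i code = pvA_collect lines g i code := by
  induction f with
  | zero =>
      intro g i code hf _
      have h : ¬ i < lines.length := by omega
      rw [pvA_collect_stop lines 0 i code h, pvA_collect_stop lines g i code h]
  | succ f ih =>
      intro g i code hf hg
      by_cases h : i < lines.length
      · cases g with
        | zero => omega
        | succ g =>
            simp only [pvA_collect, if_pos h]
            split
            · rfl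
            · exact ih g (i + 1) _ (by omega) (by omega)
      · rw [pvA_collect_stop lines _ i code h, pvA_collect_stop lines g i code h]

theorem pvA_skipBlanks_irrel (lines : List String) (f : Nat) : ∀ (g i : Nat),
    lines.length - i ≤ f → lines.length - i ≤ g →
    pvA_skipBlanks lines f i = pvA_skipBlanks lines g i := by
  induction f with
  | zero =>
      intro g i hf _
      have h : ¬ i < lines.length := by omega
      rw [pvA_skipBlanks_stop' lines 0 i h, pvA_skipBlanks_stop' lines g i h]
  | succ f ih =>
      intro g i hf hg
      by_cases h : i < lines.length
      · cases g with
        | zero => omega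
        | succ g =>
            simp only [pvA_skipBlanks, if_pos h]
            split
            · exact ih g (i + 1) (by omega) (by omega)
            · rfl
      · rw [pvA_skipBlanks_stop' lines _ i h, pvA_skipBlanks_stop' lines g i h]

theorem pvA_look_irrel (lines : List String) (f : Nat) : ∀ (g i : Nat) (language : String)
    (code : List String), lines.length - i ≤ f → lines.length - i ≤ g →
    pvA_look lines f i language code = pvA_look lines g i language code := by
  induction f with
  | zero =>
      intro g i language code hf _
      have h : ¬ i < lines.length := by omega
      rw [pvA_look_stop lines 0 i language code h, pvA_look_stop lines g i language code h]
  | succ f ih =>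
      intro g i language code hf hg
      by_cases h : i < lines.length
      · cases g with
        | zero => omega
        | succ g =>
            simp only [pvA_look]
            split
            · split
              · have h1 := pvA_skipBlanks_ge lines lines.length i
                have h2 := pvA_collect_ge lines lines.length
                  (pvA_skipBlanks lines lines.length i + 1) code
                apply ih g
                · split <;> omega
                · split <;> omega
              · rfl
            · rfl
      · rw [pvA_look_stop lines _ i language code h, pvA_look_stop lines g i language code h]

theorem pvA_main_irrel (lines : List String) (f : Nat) : ∀ (g i : Nat) (acc : List String),
    lines.length - i ≤ f → lines.length - i ≤ g →
    pvA_main lines f i acc = pvA_main lines g i acc := by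
  induction f with
  | zero =>
      intro g i acc hf _
      have h : ¬ i < lines.length := by omega
      rw [pvA_main_stop lines 0 i acc h, pvA_main_stop lines g i acc h]
  | succ f ih =>
      intro g i acc hf hg
      by_cases h : i < lines.length
      · cases g with
        | zero => omega
        | succ g =>
            simp only [pvA_main, if_pos h]
            split
            · have h2 := pvA_collect_ge lines lines.length (i + 1) []
              have h3a := pvA_look_ge lines lines.length
                ((pvA_collect lines lines.length (i + 1) []).1 + 1)
                (PySem.Str.strip (PySem.Str.slice (lines.getD i "") (some 3) none))
                (pvA_collect lines lines.length (i + 1) []).2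
              have h3b := pvA_look_ge lines lines.length
                (pvA_collect lines lines.length (i + 1) []).1
                (PySem.Str.strip (PySem.Str.slice (lines.getD i "") (some 3) none))
                (pvA_collect lines lines.length (i + 1) []).2
              apply ih g
              · split <;> omega
              · split <;> omega
            · exact ih g (i + 1) _ (by omega) (by omega)
      · rw [pvA_main_stop lines _ i acc h, pvA_main_stop lines g i acc h]

-- bump the canonical fuel lines.length to a successor so one structural step unfolds
theorem pvA_main_bump (lines : List String) (i : Nat) (acc : List String) :
    pvA_main lines lines.length i acc = pvA_main lines (lines.length + 1) i acc :=
  pvA_main_irrel lines lines.length (lines.length + 1) i acc (by omega) (by omega)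

theorem pvA_collect_bump (lines : List String) (i : Nat) (code : List String) :
    pvA_collect lines lines.length i code = pvA_collect lines (lines.length + 1) i code :=
  pvA_collect_irrel lines lines.length (lines.length + 1) i code (by omega) (by omega)

theorem pvA_skipBlanks_bump (lines : List String) (i : Nat) :
    pvA_skipBlanks lines lines.length i = pvA_skipBlanks lines (lines.length + 1) i :=
  pvA_skipBlanks_irrel lines lines.length (lines.length + 1) i (by omega) (by omega)

theorem pvA_look_bump (lines : List String) (i : Nat) (language : String) (code : List String) :
    pvA_look lines lines.length i language code = pvA_look lines (lines.length + 1) i language code :=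
  pvA_look_irrel lines lines.length (lines.length + 1) i language code (by omega) (by omega)

-- How A's loops continue from line index i when B's machine is in state st
-- (all of A's loops taken at the canonical fuel lines.length)
def pvAcont (lines : List String) (i : Nat)
    (st : List String × PvBMode × String × List String) : List String :=
  match st with
  | (outAcc, .out, _, _) => pvA_main lines lines.length i outAcc
  | (outAcc, .ins, lang, code) =>
      let r := pvA_collect lines lines.length i code
      let i2 := if r.1 < lines.length then r.1 + 1 else r.1
      let s := pvA_look lines lines.length i2 lang r.2
      pvA_main lines lines.length s.1 (pvB_flush outAcc lang s.2)
  | (outAcc, .after, lang, code) =>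
      let s := pvA_look lines lines.length i lang code
      pvA_main lines lines.length s.1 (pvB_flush outAcc lang s.2)

-- B's run from line index i in state st, including the final flush
def pvBrun (lines : List String) (i : Nat)
    (st : List String × PvBMode × String × List String) : List String :=
  match (lines.drop i).foldl pvB_step st with
  | (outAcc, mode, lang, code) =>
      if mode = PvBMode.out then outAcc else pvB_flush outAcc lang code

theorem pvA_skipBlanks_stop (lines : List String) (i : Nat) (h : i < lines.length)
    (hb : ¬ (PySem.Str.strip (lines.getD i "") == "") = true) :
    pvA_skipBlanks lines lines.length i = i := by
  rw [pvA_skipBlanks_bump, pvA_skipBlanks, if_pos h, if_neg hb]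

theorem pvA_look_blank (lines : List String) (i : Nat) (language : String) (code : List String)
    (h : i < lines.length) (hb : (PySem.Str.strip (lines.getD i "") == "") = true) :
    pvA_look lines lines.length i language code = pvA_look lines lines.length (i + 1) language code := by
  have hskip : pvA_skipBlanks lines lines.length i = pvA_skipBlanks lines lines.length (i + 1) := by
    rw [pvA_skipBlanks_bump, pvA_skipBlanks, if_pos h, if_pos hb]
  rw [pvA_look_bump lines i, pvA_look_bump lines (i + 1)]
  simp only [pvA_look, hskip]

-- one step of B's machine matches A's continuation
theorem pvAcont_step (lines : List String) (i : Nat) (h : i < lines.length)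
    (st : List String × PvBMode × String × List String) :
    pvAcont lines i st = pvAcont lines (i + 1) (pvB_step st (lines.getD i "")) := by
  obtain ⟨o, mode, lg, cd⟩ := st
  cases mode with
  | out =>
      by_cases hop : (PySem.Str.startswith (lines.getD i "") "```" &&
          !(PySem.Str.endswith (lines.getD i "") "```")) = true
      · simp only [pvAcont, pvB_step, if_pos hop]
        conv_lhs => rw [pvA_main_bump]
        rw [pvA_main, if_pos h, if_pos hop]
        rfl
      · simp only [pvAcont, pvB_step, if_neg hop]
        conv_lhs => rw [pvA_main_bump]
        rw [pvA_main, if_pos h, if_neg hop]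
  | ins =>
      by_cases hsw : (PySem.Str.startswith (lines.getD i "") "```") = true
      · have hcol : pvA_collect lines lines.length i cd = (i, cd) := by
          rw [pvA_collect_bump, pvA_collect, if_pos h, if_pos hsw]
        simp only [pvAcont, pvB_step, if_pos hsw, hcol]
        rw [if_pos h]
      · have hcol : pvA_collect lines lines.length i cd =
            pvA_collect lines lines.length (i + 1) (cd ++ [lines.getD i ""]) := by
          conv_lhs => rw [pvA_collect_bump]
          rw [pvA_collect, if_pos h, if_neg hsw]
        simp only [pvAcont, pvB_step, if_neg hsw, hcol]
  | after =>
      by_cases hb : (PySem.Str.strip (lines.getD i "") == "") = true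
      · simp only [pvAcont, pvB_step, if_pos hb]
        rw [pvA_look_blank lines i lg cd h hb]
      · by_cases hm : (PySem.Str.startswith (lines.getD i "") "```" &&
            (PySem.Str.strip (PySem.Str.slice (lines.getD i "") (some 3) none) == lg)) = true
        · simp only [pvAcont, pvB_step, if_neg hb, if_pos hm]
          conv_lhs => rw [pvA_look_bump]
          rw [pvA_look]
          simp only [pvA_skipBlanks_stop lines i h hb]
          rw [if_pos h, if_pos hm]
        · have hlook : pvA_look lines lines.length i lg cd = (i, cd) := by
            rw [pvA_look_bump, pvA_look]
            simp only [pvA_skipBlanks_stop lines i h hb]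
            rw [if_pos h, if_neg hm]
          by_cases hop : (PySem.Str.startswith (lines.getD i "") "```" &&
              !(PySem.Str.endswith (lines.getD i "") "```")) = true
          · simp only [pvAcont, pvB_step, if_neg hb, if_neg hm, if_pos hop, hlook]
            conv_lhs => rw [pvA_main_bump]
            rw [pvA_main, if_pos h, if_pos hop]
            rfl
          · simp only [pvAcont, pvB_step, if_neg hb, if_neg hm, if_neg hop, hlook]
            conv_lhs => rw [pvA_main_bump]
            rw [pvA_main, if_pos h, if_neg hop]

theorem pv_sim_base (lines : List String) (i : Nat) (hni : ¬ i < lines.length)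
    (st : List String × PvBMode × String × List String) :
    pvBrun lines i st = pvAcont lines i st := by
  have hdrop : lines.drop i = [] := List.drop_eq_nil_of_le (by omega)
  obtain ⟨o, mode, lg, cd⟩ := st
  have hmain : ∀ acc, pvA_main lines lines.length i acc = acc :=
    fun acc => pvA_main_stop lines lines.length i acc hni
  have hlook : ∀ c, pvA_look lines lines.length i lg c = (i, c) :=
    fun c => pvA_look_stop lines lines.length i lg c hni
  cases mode with
  | out =>
      simp only [pvBrun, pvAcont, hdrop, List.foldl_nil, hmain]
      rfl
  | ins =>
      have hcol : pvA_collect lines lines.length i cd = (i, cd) :=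
        pvA_collect_stop lines lines.length i cd hni
      simp only [pvBrun, pvAcont, hdrop, List.foldl_nil, hcol, if_neg hni, hlook, hmain]
      rfl
  | after =>
      simp only [pvBrun, pvAcont, hdrop, List.foldl_nil, hlook, hmain]
      rfl

theorem pv_sim_aux (lines : List String) (n : Nat) : ∀ (i : Nat),
    lines.length - i ≤ n → ∀ st, pvBrun lines i st = pvAcont lines i st := by
  induction n with
  | zero =>
      intro i hi st
      exact pv_sim_base lines i (by omega) st
  | succ n ih =>
      intro i hi st
      by_cases h : i < lines.length
      · have hdrop : lines.drop i = lines.getD i "" :: lines.drop (i + 1) := by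
          rw [List.drop_eq_getElem_cons h]
          congr 1
          simp [List.getD_eq_getElem?_getD, List.getElem?_eq_getElem h]
        have hb : pvBrun lines i st = pvBrun lines (i + 1) (pvB_step st (lines.getD i "")) := by
          simp only [pvBrun, hdrop, List.foldl_cons]
        rw [hb, ih (i + 1) (by omega), ← pvAcont_step lines i h st]
      · exact pv_sim_base lines i h st

-- ===== VERDICT (by name: the statement is the Claim_ definition above) =====
theorem consolidate_code_blocks_spec : Claim_equal_consolidate_code_blocks := by
  intro md _
  unfold Spec_consolidate_code_blocks consolidate_code_blocks consolidate_code_blocks_alt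
  have h := pv_sim_aux ((PySem.Str.split? md "\n").getD []) ((PySem.Str.split? md "\n").getD []).length
    0 (by omega) ([], .out, "", [])
  simp only [pvBrun, pvAcont, List.drop_zero] at h
  rw [← h]
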